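-- pv_equiv track=rewrite | github.com/kapoor08/queryon | backend/app/api/v1/chat.py | generate_template_response
-- ===== SOURCE A (Python) =====
-- def generate_template_response(query: str, context_docs: list) -> str:
--     """Generate template response when LLM is unavailable"""
--     if not context_docs:
--         return "I don't have enough information to answer that question. Could you please provide more details or try asking about our product features, pricing, or general information?"
--
--     # Get first document
--     content, score, metadata = context_docs[0]
--     title = metadata.get("title", "our documentation")
--
--     query_lower = query.lower()
--
--     # Template responses based on query type
--     if any(
--         word in query_lower
--         for word in ["price", "cost", "pricing", "plan", "subscription"]
--     ):
--         if "pricing" in title.lower():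
--             return f"Here's our pricing information:\n\n{content}\n\nWould you like to know more about any specific plan?"
--         else:
--             return f"Based on {title}: {content[:300]}...\n\nFor detailed pricing information, please check our pricing documentation."
--
--     elif any(
--         word in query_lower
--         for word in ["feature", "capability", "what", "how", "function"]
--     ):
--         if "feature" in title.lower():
--             return f"Here are our key features:\n\n{content}\n\nIs there a specific feature you'd like to know more about?"
--         else:
--             return f"Here's what I found about our capabilities:\n\n{content[:300]}...\n\nWould you like more details about any specific feature?"
--
--     elif any(
--         word in query_lower for word in ["product", "overview", "about", "what is"]
--     ):
--         if "overview" in title.lower():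
--             return f"About our product:\n\n{content}\n\nWhat specific aspect would you like to explore further?"
--         else:
--             return f"Here's information about our product:\n\n{content[:300]}...\n\nWhat would you like to know more about?"
--
--     # Default response
--     return f"Based on {title}:\n\n{content[:400]}...\n\nDoes this help answer your question? Feel free to ask for more specific information."
-- ===== SOURCE B (Python) =====
-- # Data-driven re-implementation: an ordered rule table of (keywords, title_key,
-- # matched_template, unmatched_template), templates being piece lists rendered in one pass.
--
-- TITLE, FULL, HEAD300, HEAD400 = 0, 1, 2, 3
--
-- _RULES = [
--     (["price", "cost", "pricing", "plan", "subscription"], "pricing",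
--      ["Here's our pricing information:\n\n", FULL,
--       "\n\nWould you like to know more about any specific plan?"],
--      ["Based on ", TITLE, ": ", HEAD300,
--       "...\n\nFor detailed pricing information, please check our pricing documentation."]),
--     (["feature", "capability", "what", "how", "function"], "feature",
--      ["Here are our key features:\n\n", FULL,
--       "\n\nIs there a specific feature you'd like to know more about?"],
--      ["Here's what I found about our capabilities:\n\n", HEAD300,
--       "...\n\nWould you like more details about any specific feature?"]),
--     (["product", "overview", "about", "what is"], "overview",
--      ["About our product:\n\n", FULL,
--       "\n\nWhat specific aspect would you like to explore further?"],
--      ["Here's information about our product:\n\n", HEAD300,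
--       "...\n\nWhat would you like to know more about?"]),
-- ]
--
-- _DEFAULT = ["Based on ", TITLE, ":\n\n", HEAD400,
--             "...\n\nDoes this help answer your question? Feel free to ask for more specific information."]
--
--
-- def _render(pieces, title, content):
--     out = ""
--     for p in pieces:
--         if isinstance(p, str):
--             out += p
--         elif p == TITLE:
--             out += title
--         elif p == FULL:
--             out += content
--         elif p == HEAD300:
--             out += content[:300]
--         else:
--             out += content[:400]
--     return out
--
--
-- def generate_template_response(query: str, context_docs: list) -> str:
--     if not context_docs:
--         return "I don't have enough information to answer that question. Could you please provide more details or try asking about our product features, pricing, or general information?"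
--     content, score, metadata = context_docs[0]
--     title = metadata.get("title", "our documentation")
--     query_lower = query.lower()
--     for keywords, title_key, matched, unmatched in _RULES:
--         if any(word in query_lower for word in keywords):
--             pieces = matched if title_key in title.lower() else unmatched
--             return _render(pieces, title, content)
--     return _render(_DEFAULT, title, content)
-- ===== Notes on version B (the rewrite author's own statement) =====
-- stated objective: alternative
-- what changed: Replaces the hard-coded if/elif chain of f-strings with an ordered rule table (keywords, title key, piece-list templates) scanned by a single loop and rendered by one generic piece-renderer.
import Mathlib
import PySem

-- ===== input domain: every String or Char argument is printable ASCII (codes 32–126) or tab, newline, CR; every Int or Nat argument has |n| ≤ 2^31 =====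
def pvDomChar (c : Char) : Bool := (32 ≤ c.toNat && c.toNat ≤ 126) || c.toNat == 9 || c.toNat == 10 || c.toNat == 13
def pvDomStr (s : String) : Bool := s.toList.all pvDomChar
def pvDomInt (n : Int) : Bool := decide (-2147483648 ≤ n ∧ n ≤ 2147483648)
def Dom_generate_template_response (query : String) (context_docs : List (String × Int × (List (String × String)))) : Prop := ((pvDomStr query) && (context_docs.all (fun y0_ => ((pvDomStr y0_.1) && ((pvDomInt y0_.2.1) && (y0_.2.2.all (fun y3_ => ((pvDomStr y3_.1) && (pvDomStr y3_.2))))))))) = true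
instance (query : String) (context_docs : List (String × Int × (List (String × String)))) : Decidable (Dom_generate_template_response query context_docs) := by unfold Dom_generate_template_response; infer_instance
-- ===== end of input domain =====

-- B replaces A's hard-coded if/elif chain of f-strings with an ordered rule table scanned
-- by one loop and a generic piece-renderer (alternative decomposition; same cost).

-- ===== PORT A =====
def generate_template_response (query : String) (context_docs : List (String × Int × (List (String × String)))) : String :=
  match context_docs with
  | [] => "I don't have enough information to answer that question. Could you please provide more details or try asking about our product features, pricing, or general information?"
  | (content, _score, metadata) :: _ =>
    let title := PySem.Dict.getD (PySem.Dict.mk metadata) "title" "our documentation"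
    let query_lower := PySem.Str.lower query
    if ["price", "cost", "pricing", "plan", "subscription"].any (fun w => PySem.Str.isIn w query_lower) then
      if PySem.Str.isIn "pricing" (PySem.Str.lower title) then
        "Here's our pricing information:\n\n" ++ content ++ "\n\nWould you like to know more about any specific plan?"
      else
        "Based on " ++ title ++ ": " ++ PySem.Str.slice content none (some 300) ++ "...\n\nFor detailed pricing information, please check our pricing documentation."
    else if ["feature", "capability", "what", "how", "function"].any (fun w => PySem.Str.isIn w query_lower) then
      if PySem.Str.isIn "feature" (PySem.Str.lower title) then
        "Here are our key features:\n\n" ++ content ++ "\n\nIs there a specific feature you'd like to know more about?"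
      else
        "Here's what I found about our capabilities:\n\n" ++ PySem.Str.slice content none (some 300) ++ "...\n\nWould you like more details about any specific feature?"
    else if ["product", "overview", "about", "what is"].any (fun w => PySem.Str.isIn w query_lower) then
      if PySem.Str.isIn "overview" (PySem.Str.lower title) then
        "About our product:\n\n" ++ content ++ "\n\nWhat specific aspect would you like to explore further?"
      else
        "Here's information about our product:\n\n" ++ PySem.Str.slice content none (some 300) ++ "...\n\nWhat would you like to know more about?"
    else
      "Based on " ++ title ++ ":\n\n" ++ PySem.Str.slice content none (some 400) ++ "...\n\nDoes this help answer your question? Feel free to ask for more specific information."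

-- ===== PORT B =====
inductive PvPiece
  | lit : String → PvPiece
  | title
  | full
  | head300
  | head400

def pvRender (pieces : List PvPiece) (title content : String) : String :=
  pieces.foldl
    (fun out p =>
      out ++
        match p with
        | .lit s => s
        | .title => title
        | .full => content
        | .head300 => PySem.Str.slice content none (some 300)
        | .head400 => PySem.Str.slice content none (some 400))
    ""

def pvRules : List (List String × String × List PvPiece × List PvPiece) :=
  [ (["price", "cost", "pricing", "plan", "subscription"], "pricing",
     [.lit "Here's our pricing information:\n\n", .full,
      .lit "\n\nWould you like to know more about any specific plan?"],
     [.lit "Based on ", .title, .lit ": ", .head300,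
      .lit "...\n\nFor detailed pricing information, please check our pricing documentation."]),
    (["feature", "capability", "what", "how", "function"], "feature",
     [.lit "Here are our key features:\n\n", .full,
      .lit "\n\nIs there a specific feature you'd like to know more about?"],
     [.lit "Here's what I found about our capabilities:\n\n", .head300,
      .lit "...\n\nWould you like more details about any specific feature?"]),
    (["product", "overview", "about", "what is"], "overview",
     [.lit "About our product:\n\n", .full,
      .lit "\n\nWhat specific aspect would you like to explore further?"],
     [.lit "Here's information about our product:\n\n", .head300,
      .lit "...\n\nWhat would you like to know more about?"]) ]

def pvDefault : List PvPiece :=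
  [.lit "Based on ", .title, .lit ":\n\n", .head400,
   .lit "...\n\nDoes this help answer your question? Feel free to ask for more specific information."]

def generate_template_response_alt (query : String) (context_docs : List (String × Int × (List (String × String)))) : String :=
  match context_docs with
  | [] => "I don't have enough information to answer that question. Could you please provide more details or try asking about our product features, pricing, or general information?"
  | (content, _score, metadata) :: _ =>
    let title := PySem.Dict.getD (PySem.Dict.mk metadata) "title" "our documentation"
    let query_lower := PySem.Str.lower query
    match pvRules.find? (fun r => r.1.any (fun w => PySem.Str.isIn w query_lower)) with
    | some (_, title_key, matched, unmatched) =>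
      pvRender (if PySem.Str.isIn title_key (PySem.Str.lower title) then matched else unmatched) title content
    | none => pvRender pvDefault title content

-- ===== PRECONDITION & SPEC =====
def Spec_generate_template_response (query : String) (context_docs : List (String × Int × (List (String × String)))) (out : String) : Prop := out = generate_template_response_alt query context_docs
instance (query : String) (context_docs : List (String × Int × (List (String × String)))) (out : String) : Decidable (Spec_generate_template_response query context_docs out) := by unfold Spec_generate_template_response; infer_instance

-- ===== CLAIM (what is proved, stated in full; the proofs are below) =====
def Claim_equal_generate_template_response : Prop := ∀ (query : String) (context_docs : List (String × Int × (List (String × String)))), Dom_generate_template_response query context_docs → Spec_generate_template_response query context_docs (generate_template_response query context_docs)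

-- ===== LEMMAS AND PROOFS =====

-- ===== VERDICT (by name: the statement is the Claim_ definition above) =====
theorem generate_template_response_spec : Claim_equal_generate_template_response := by
  intro query context_docs _
  unfold Spec_generate_template_response generate_template_response generate_template_response_alt
  match context_docs with
  | [] => rfl
  | (content, _score, metadata) :: _ =>
    simp only [pvRules, List.find?]
    cases h1 : List.any ["price", "cost", "pricing", "plan", "subscription"]
        (fun w => PySem.Str.isIn w (PySem.Str.lower query)) with
    | true =>
      simp only [pvRender]
      cases ht : PySem.Str.isIn "pricing"
          (PySem.Str.lower (PySem.Dict.getD (PySem.Dict.mk metadata) "title" "our documentation")) <;>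
        simp [List.foldl]
    | false =>
      cases h2 : List.any ["feature", "capability", "what", "how", "function"]
          (fun w => PySem.Str.isIn w (PySem.Str.lower query)) with
      | true =>
        simp only [pvRender]
        cases ht : PySem.Str.isIn "feature"
            (PySem.Str.lower (PySem.Dict.getD (PySem.Dict.mk metadata) "title" "our documentation")) <;>
          simp [List.foldl]
      | false =>
        cases h3 : List.any ["product", "overview", "about", "what is"]
            (fun w => PySem.Str.isIn w (PySem.Str.lower query)) with
        | true =>
          simp only [pvRender]
          cases ht : PySem.Str.isIn "overview"
              (PySem.Str.lower (PySem.Dict.getD (PySem.Dict.mk metadata) "title" "our documentation")) <;>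
            simp [List.foldl]
        | false => simp [pvRender, pvDefault, List.foldl]
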